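-- pv_equiv track=rewrite | github.com/MrBrantCode/unitest_baseline | mut_generate/mist_train_taco/taco_6457/solution.py | calculate_circular_array_sum
-- ===== SOURCE A (Python) =====
-- def calculate_circular_array_sum(N, K, A):
--     s = sum(A)
--     count_0 = A.count(0)
--
--     if count_0 == N:
--         return 0
--
--     # Find the first non-zero element from the end
--     for i in range(N - 1, -1, -1):
--         if A[i] != 0:
--             k = i
--             break
--
--     # Initialize the auxiliary array
--     N_aux = [0] * N
--     a = N - k - 1
--
--     # Fill the auxiliary array with distances to the next non-zero element
--     for i in range(N):
--         if A[i] == 0: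
--             a += 1
--             N_aux[i] = a
--         else:
--             a = 0
--
--     # Find the first non-zero element from the start
--     for i in range(N):
--         if A[i] != 0:
--             k = i
--             break
--
--     a = k
--
--     # Update the auxiliary array with distances to the previous non-zero element
--     for i in range(N - 1, -1, -1):
--         if A[i] == 0:
--             a += 1
--             N_aux[i] = min(a, N_aux[i])
--         else:
--             a = 0
--
--     ans = s
--
--     # Calculate the final sum after K seconds
--     for i in range(N):
--         a = N_aux[i]
--         b = max(0, K - a)
--         ans += 2 * b
--
--     return ans
-- ===== SOURCE B (Python) =====
-- def calculate_circular_array_sum(N, K, A):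
--     # Doubling trick on the circular window A[:N]: scan W+W once in each direction,
--     # no wrap seeds and no in-place array updates needed.
--     if A.count(0) == N:
--         return 0
--     W = A[:N]
--     D = W + W
--     prv = []
--     c = 0
--     for x in D:
--         c = 0 if x != 0 else c + 1
--         prv.append(c)
--     nxt = []
--     c = 0
--     for x in reversed(D):
--         c = 0 if x != 0 else c + 1
--         nxt.append(c)
--     nxt.reverse()
--     return sum(A) + sum(2 * max(0, K - min(p, q)) for p, q in zip(prv[N:], nxt[:N]))
-- ===== Notes on version B (the rewrite author's own statement) =====
-- stated objective: alternative
-- what changed: B replaces A's four seeded index loops (find-last-nonzero, forward pass, find-first-nonzero, backward pass, all mutating an aux array in place) by two directional counter scans of the doubled window W+W with W = A[:N], whose halves are the circular wrap distances directly, then sums over the zipped distance lists.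
import Mathlib
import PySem

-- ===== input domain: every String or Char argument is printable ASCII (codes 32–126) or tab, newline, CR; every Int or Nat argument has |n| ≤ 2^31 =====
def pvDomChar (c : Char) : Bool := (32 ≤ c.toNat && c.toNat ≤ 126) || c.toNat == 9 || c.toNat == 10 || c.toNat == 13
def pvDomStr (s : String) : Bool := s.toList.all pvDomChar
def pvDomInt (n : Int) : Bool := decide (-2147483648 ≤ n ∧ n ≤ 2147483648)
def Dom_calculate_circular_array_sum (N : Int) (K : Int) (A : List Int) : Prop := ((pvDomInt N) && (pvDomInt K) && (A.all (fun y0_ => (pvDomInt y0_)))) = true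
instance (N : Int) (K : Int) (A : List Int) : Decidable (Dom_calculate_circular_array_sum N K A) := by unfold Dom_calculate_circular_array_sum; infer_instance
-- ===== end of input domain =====

-- B replaces A's four seeded index loops with two directional scans of the doubled window A[:N]+A[:N]
-- (alternative decomposition, same O(N) cost); Pre_ is exactly the set of inputs where A returns.

-- ===== PORT A =====
def calculate_circular_array_sum (N : Int) (K : Int) (A : List Int) : Int :=
  let s := A.sum
  let count_0 : Int := (PySem.List.count A 0 : Int)
  if count_0 = N then 0
  else
    -- 'for i in range(N-1,-1,-1): if A[i]!=0: k=i; break'; if never found Python raises NameError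
    -- at the use of k (excluded by Pre_), so the .getD 0 default is unreachable under Pre_
    let k := ((PySem.List.pyRange (N-1) (-1) (-1)).find? (fun i => PySem.List.pyGetD A i 0 != 0)).getD 0
    let N_aux : List Int := List.replicate N.toNat 0
    let a := N - k - 1
    let st1 := (PySem.List.pyRange 0 N 1).foldl (fun (st : List Int × Int) i =>
        if PySem.List.pyGetD A i 0 = 0 then
          (PySem.List.pySetD st.1 i (st.2 + 1), st.2 + 1)
        else (st.1, 0)) (N_aux, a)
    let k2 := ((PySem.List.pyRange 0 N 1).find? (fun i => PySem.List.pyGetD A i 0 != 0)).getD 0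
    let st2 := (PySem.List.pyRange (N-1) (-1) (-1)).foldl (fun (st : List Int × Int) i =>
        if PySem.List.pyGetD A i 0 = 0 then
          (PySem.List.pySetD st.1 i (min (st.2 + 1) (PySem.List.pyGetD st.1 i 0)), st.2 + 1)
        else (st.1, 0)) (st1.1, k2)
    (PySem.List.pyRange 0 N 1).foldl (fun ans i =>
        ans + 2 * max 0 (K - PySem.List.pyGetD st2.1 i 0)) s

-- ===== PORT B =====
def calculate_circular_array_sum_alt (N : Int) (K : Int) (A : List Int) : Int :=
  if (PySem.List.count A 0 : Int) = N then 0
  else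
    let W := PySem.List.slice A none (some N)
    let D := W ++ W
    let prvSt := D.foldl (fun (st : List Int × Int) x =>
        let c := if x ≠ 0 then 0 else st.2 + 1
        (st.1 ++ [c], c)) ([], 0)
    let nxtSt := D.reverse.foldl (fun (st : List Int × Int) x =>
        let c := if x ≠ 0 then 0 else st.2 + 1
        (st.1 ++ [c], c)) ([], 0)
    let nxt := nxtSt.1.reverse
    A.sum + (((PySem.List.slice prvSt.1 (some N) none).zip (PySem.List.slice nxt none (some N))).map
        (fun pq => 2 * max 0 (K - min pq.1 pq.2))).sum

-- ===== PRECONDITION & SPEC =====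
-- Pre_ holds exactly on the inputs where A returns normally: either the all-zero shortcut fires
-- (A.count(0) == N), or 0 <= N <= len(A) and the window A[:N] has a nonzero entry; on every other
-- input A raises (IndexError for N > len(A), NameError when the break that binds k never fires).
def Pre_calculate_circular_array_sum (N : Int) (K : Int) (A : List Int) : Prop :=
  (PySem.List.count A 0 : Int) = N ∨
    (0 ≤ N ∧ N ≤ (A.length : Int) ∧ ∃ y ∈ A.take N.toNat, y ≠ 0)
instance (N : Int) (K : Int) (A : List Int) : Decidable (Pre_calculate_circular_array_sum N K A) := by
  unfold Pre_calculate_circular_array_sum; infer_instance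

def pvWitness_calculate_circular_array_sum : Int × Int × List Int := (3, 2, [1, 0, 0])

def Spec_calculate_circular_array_sum (N : Int) (K : Int) (A : List Int) (out : Int) : Prop := out = calculate_circular_array_sum_alt N K A
instance (N : Int) (K : Int) (A : List Int) (out : Int) : Decidable (Spec_calculate_circular_array_sum N K A out) := by unfold Spec_calculate_circular_array_sum; infer_instance

-- ===== CLAIM (what is proved, stated in full; the proofs are below) =====
def Claim_equal_calculate_circular_array_sum : Prop := ∀ (N : Int) (K : Int) (A : List Int), Dom_calculate_circular_array_sum N K A → Pre_calculate_circular_array_sum N K A → Spec_calculate_circular_array_sum N K A (calculate_circular_array_sum N K A)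

-- ===== LEMMAS AND PROOFS =====

-- running zero-distance scan: pvScan l c = list of counters, pvCarry l c = final counter
def pvScan : List Int → Int → List Int
  | [], _ => []
  | x :: xs, c => let c' := if x ≠ 0 then 0 else c + 1; c' :: pvScan xs c'

def pvCarry : List Int → Int → Int
  | [], c => c
  | x :: xs, c => pvCarry xs (if x ≠ 0 then 0 else c + 1)

-- overlay: what A's set-loops compute on the aux array (u = how a zero cell is updated)
def pvOv (u : Int → Int → Int) : List Int → List Int → Int → List Int × Int
  | [], os, c => (os, c)
  | _ :: _, [], c => ([], c)
  | x :: xs, o :: os, c =>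
      let r := pvOv u xs os (if x = 0 then c + 1 else 0)
      ((if x = 0 then u (c + 1) o else o) :: r.1, r.2)

-- leading zeros
def pvLz : List Int → Nat
  | [] => 0
  | x :: xs => if x = 0 then pvLz xs + 1 else 0

theorem pvScan_length (l : List Int) (c : Int) : (pvScan l c).length = l.length := by
  induction l generalizing c with
  | nil => rfl
  | cons x xs ih => simp [pvScan, ih]

theorem pvScan_append (l₁ l₂ : List Int) (c : Int) :
    pvScan (l₁ ++ l₂) c = pvScan l₁ c ++ pvScan l₂ (pvCarry l₁ c) := by
  induction l₁ generalizing c with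
  | nil => rfl
  | cons x xs ih => by_cases hx : x = 0 <;> simp [pvScan, pvCarry, hx, ih]

theorem pvBuild_foldl (l : List Int) (acc : List Int) (c : Int) :
    l.foldl (fun (st : List Int × Int) x =>
        (st.1 ++ [if x = 0 then st.2 + 1 else 0], if x = 0 then st.2 + 1 else 0)) (acc, c)
      = (acc ++ pvScan l c, pvCarry l c) := by
  induction l generalizing acc c with
  | nil => simp [pvScan, pvCarry]
  | cons x xs ih => by_cases hx : x = 0 <;> simp [pvScan, pvCarry, hx, ih]

theorem pvLz_lt_length (l : List Int) (h : ∃ y ∈ l, y ≠ 0) : pvLz l < l.length := by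
  induction l with
  | nil => simp at h
  | cons x xs ih =>
    by_cases hx : x = 0
    · subst hx
      obtain ⟨y, hy, hy0⟩ := h
      rcases List.mem_cons.mp hy with rfl | hy'
      · exact absurd rfl hy0
      · simpa [pvLz] using ih ⟨y, hy', hy0⟩
    · simp [pvLz, hx]

theorem pvLz_append_left (l₁ l₂ : List Int) (h : ∃ y ∈ l₁, y ≠ 0) :
    pvLz (l₁ ++ l₂) = pvLz l₁ := by
  induction l₁ with
  | nil => simp at h
  | cons x xs ih =>
    by_cases hx : x = 0
    · subst hx
      obtain ⟨y, hy, hy0⟩ := h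
      rcases List.mem_cons.mp hy with rfl | hy'
      · exact absurd rfl hy0
      · simp [pvLz, ih ⟨y, hy', hy0⟩]
    · simp [pvLz, hx]

theorem pvLz_append_allzero (l₁ l₂ : List Int) (h : ∀ y ∈ l₁, y = 0) :
    pvLz (l₁ ++ l₂) = l₁.length + pvLz l₂ := by
  induction l₁ with
  | nil => simp
  | cons x xs ih =>
    have hx : x = 0 := h x (by simp)
    have := ih (fun y hy => h y (by simp [hy]))
    simp [pvLz, hx, this]
    omega

theorem pvCarry_allzero (l : List Int) (c : Int) (h : ∀ y ∈ l, y = 0) :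
    pvCarry l c = c + l.length := by
  induction l generalizing c with
  | nil => simp [pvCarry]
  | cons x xs ih =>
    have hx : x = 0 := h x (by simp)
    have := ih (c + 1) (fun y hy => h y (by simp [hy]))
    simp [pvCarry, hx, this]
    omega

theorem pvCarry_tz (l : List Int) (c : Int) (h : ∃ y ∈ l, y ≠ 0) :
    pvCarry l c = (pvLz l.reverse : Nat) := by
  induction l generalizing c with
  | nil => simp at h
  | cons x xs ih =>
    by_cases hxs : ∃ y ∈ xs, y ≠ 0
    · have h1 := ih (if x ≠ 0 then 0 else c + 1) hxs
      have h2 : pvLz (xs.reverse ++ [x]) = pvLz xs.reverse :=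
        pvLz_append_left _ _ (by obtain ⟨y, hy, hy0⟩ := hxs; exact ⟨y, by simp [hy], hy0⟩)
      simpa [pvCarry, h2] using h1
    · push Not at hxs
      have hx : x ≠ 0 := by
        obtain ⟨y, hy, hy0⟩ := h
        rcases List.mem_cons.mp hy with rfl | hy'
        · exact hy0
        · exact absurd (hxs y hy') hy0
      have h1 : pvCarry xs 0 = (0 : Int) + xs.length := pvCarry_allzero xs 0 hxs
      have h2 : pvLz (xs.reverse ++ [x]) = xs.reverse.length + pvLz [x] :=
        pvLz_append_allzero _ _ (fun y hy => hxs y (by simpa using hy))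
      have h3 : pvLz [x] = 0 := by simp [pvLz, hx]
      simp [pvCarry, hx, h1, h2, h3]

theorem pvFindCongr {α : Type} (l : List α) (p q : α → Bool) (h : ∀ x ∈ l, p x = q x) :
    l.find? p = l.find? q := by
  induction l with
  | nil => rfl
  | cons x xs ih =>
    rw [List.find?_cons, List.find?_cons, h x (by simp),
      ih (fun y hy => h y (by simp [hy]))]

theorem pvFindAsc (A : List Int) (n j : Nat) (hn : j + n = A.length) (h : ∃ y ∈ A.drop j, y ≠ 0) :
    (PySem.List.pyRange (j : Int) (A.length : Int) 1).find? (fun i => PySem.List.pyGetD A i 0 != 0)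
      = some ((j + pvLz (A.drop j) : Nat) : Int) := by
  induction n generalizing j with
  | zero =>
    rw [List.drop_eq_nil_of_le (by omega)] at h
    simp at h
  | succ n ih =>
    have hj : j < A.length := by omega
    rw [PySem.List.pyRange_one_cons (by exact_mod_cast hj)]
    have hget : PySem.List.pyGetD A (j : Int) 0 = A[j] := by
      rw [PySem.List.pyGetD_natCast, List.getD_eq_getElem A 0 hj]
    by_cases hx : A[j] = 0
    · have hdrop : A.drop j = A[j] :: A.drop (j + 1) := List.drop_eq_getElem_cons hj
      rw [List.find?_cons_of_neg (by simp [hget, hx])]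
      have hex : ∃ y ∈ A.drop (j + 1), y ≠ 0 := by
        obtain ⟨y, hy, hy0⟩ := h
        rw [hdrop] at hy
        rcases List.mem_cons.mp hy with rfl | hy'
        · exact absurd hx hy0
        · exact ⟨y, hy', hy0⟩
      have := ih (j + 1) (by omega) hex
      rw [show ((j : Int) + 1) = ((j + 1 : Nat) : Int) by push_cast; ring, this]
      congr 1
      have : pvLz (A.drop j) = pvLz (A.drop (j + 1)) + 1 := by rw [hdrop]; simp [pvLz, hx]
      omega
    · rw [List.find?_cons_of_pos (by simp [hget, hx])]
      have hdrop : A.drop j = A[j] :: A.drop (j + 1) := List.drop_eq_getElem_cons hj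
      have : pvLz (A.drop j) = 0 := by rw [hdrop]; simp [pvLz, hx]
      simp [this]

theorem pvFindDesc (A : List Int) (j : Nat) (hj : j ≤ A.length) (h : ∃ y ∈ A.take j, y ≠ 0) :
    (PySem.List.pyRange ((j : Int) - 1) (-1) (-1)).find? (fun i => PySem.List.pyGetD A i 0 != 0)
      = some ((j - 1 - pvLz (A.take j).reverse : Nat) : Int) := by
  induction j with
  | zero => simp at h
  | succ j ih =>
    have hjl : j < A.length := by omega
    rw [show ((j + 1 : Nat) : Int) - 1 = (j : Nat) by push_cast; ring]
    rw [PySem.List.pyRange_neg_one_cons (by omega)]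
    have hget : PySem.List.pyGetD A (j : Int) 0 = A[j] := by
      rw [PySem.List.pyGetD_natCast, List.getD_eq_getElem A 0 hjl]
    have htake : A.take (j + 1) = A.take j ++ [A[j]] := by
      rw [List.take_add_one, List.getElem?_eq_getElem hjl]; rfl
    by_cases hx : A[j] = 0
    · rw [List.find?_cons_of_neg (by simp [hget, hx])]
      have hex : ∃ y ∈ A.take j, y ≠ 0 := by
        obtain ⟨y, hy, hy0⟩ := h
        rw [htake] at hy
        rcases List.mem_append.mp hy with hy' | hy'
        · exact ⟨y, hy', hy0⟩
        · simp at hy'; subst hy'; exact absurd hx hy0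
      have hlz : pvLz (A.take (j + 1)).reverse = pvLz (A.take j).reverse + 1 := by
        rw [htake, List.reverse_append]; simp [pvLz, hx]
      have hlt : pvLz (A.take j).reverse < j := by
        have := pvLz_lt_length (A.take j).reverse (by
          obtain ⟨y, hy, hy0⟩ := hex; exact ⟨y, by simp [hy], hy0⟩)
        simpa [List.length_take, Nat.min_eq_left (le_of_lt hjl)] using this
      rw [ih (by omega) hex]
      congr 1
      omega
    · rw [List.find?_cons_of_pos (by simp [hget, hx])]
      have hlz : pvLz (A.take (j + 1)).reverse = 0 := by rw [htake, List.reverse_append]; simp [pvLz, hx]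
      simp [hlz]

theorem pvLoopAsc (A : List Int) (u : Int → Int → Int) (n j : Nat) (aux : List Int) (c : Int)
    (hn : j + n = A.length) (ha : aux.length = A.length) :
    (PySem.List.pyRange (j : Int) (A.length : Int) 1).foldl
      (fun (st : List Int × Int) i =>
        if PySem.List.pyGetD A i 0 = 0 then
          (PySem.List.pySetD st.1 i (u (st.2 + 1) (PySem.List.pyGetD st.1 i 0)), st.2 + 1)
        else (st.1, 0)) (aux, c)
    = (aux.take j ++ (pvOv u (A.drop j) (aux.drop j) c).1, (pvOv u (A.drop j) (aux.drop j) c).2) := by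
  induction n generalizing j aux c with
  | zero =>
    have hjA : j = A.length := by omega
    subst hjA
    rw [PySem.List.pyRange_one_eq_nil le_rfl]
    simp [pvOv, List.take_of_length_le (le_of_eq ha), List.drop_eq_nil_of_le (le_of_eq ha)]
  | succ n ih =>
    have hj : j < A.length := by omega
    have hja : j < aux.length := by omega
    rw [PySem.List.pyRange_one_cons (by exact_mod_cast hj)]
    rw [List.foldl_cons]
    have hgetA : PySem.List.pyGetD A (j : Int) 0 = A[j] := by
      rw [PySem.List.pyGetD_natCast, List.getD_eq_getElem A 0 hj]
    have hgetaux : PySem.List.pyGetD aux (j : Int) 0 = aux[j] := by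
      rw [PySem.List.pyGetD_natCast, List.getD_eq_getElem aux 0 hja]
    have hdropA : A.drop j = A[j] :: A.drop (j + 1) := List.drop_eq_getElem_cons hj
    have hdropaux : aux.drop j = aux[j] :: aux.drop (j + 1) := List.drop_eq_getElem_cons hja
    have htakeaux : aux.take (j + 1) = aux.take j ++ [aux[j]] := by
      rw [List.take_add_one, List.getElem?_eq_getElem hja]; rfl
    have hcast : ((j : Int) + 1) = ((j + 1 : Nat) : Int) := by push_cast; ring
    by_cases hx : A[j] = 0
    · rw [if_pos (by rw [hgetA]; exact hx)]
      set v := u (c + 1) (PySem.List.pyGetD aux (j : Int) 0) with hv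
      have hset : PySem.List.pySetD aux (j : Int) v = aux.set j v := PySem.List.pySetD_natCast aux j v
      rw [hset, hcast]
      rw [ih (j + 1) (aux.set j v) (c + 1) (by omega) (by simpa using ha)]
      have h1 : (aux.set j v).take (j + 1) = aux.take j ++ [v] := by
        rw [List.take_set, htakeaux]
        rw [show (aux.take j ++ [aux[j]]).set j v = aux.take j ++ [v] by
          rw [List.set_append_right _ _ (by simp [Nat.min_eq_left (le_of_lt hja)])]
          simp [Nat.min_eq_left (le_of_lt hja)]]
      have h2 : (aux.set j v).drop (j + 1) = aux.drop (j + 1) := by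
        rw [List.drop_set]; simp
      have h3 : pvOv u (A.drop j) (aux.drop j) c
          = (v :: (pvOv u (A.drop (j + 1)) (aux.drop (j + 1)) (c + 1)).1,
             (pvOv u (A.drop (j + 1)) (aux.drop (j + 1)) (c + 1)).2) := by
        rw [hdropA, hdropaux]
        simp [pvOv, hx, hv, hgetaux]
      rw [h1, h2, h3]
      simp
    · rw [if_neg (by rw [hgetA]; exact hx)]
      rw [hcast, ih (j + 1) aux 0 (by omega) ha]
      have h3 : pvOv u (A.drop j) (aux.drop j) c
          = (aux[j] :: (pvOv u (A.drop (j + 1)) (aux.drop (j + 1)) 0).1,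
             (pvOv u (A.drop (j + 1)) (aux.drop (j + 1)) 0).2) := by
        rw [hdropA, hdropaux]
        simp [pvOv, hx]
      rw [h3, htakeaux, List.append_assoc, List.singleton_append]

theorem pvLoopDesc (A : List Int) (u : Int → Int → Int) (j : Nat) (aux : List Int) (c : Int)
    (hj : j ≤ A.length) (ha : aux.length = A.length) :
    (PySem.List.pyRange ((j : Int) - 1) (-1) (-1)).foldl
      (fun (st : List Int × Int) i =>
        if PySem.List.pyGetD A i 0 = 0 then
          (PySem.List.pySetD st.1 i (u (st.2 + 1) (PySem.List.pyGetD st.1 i 0)), st.2 + 1)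
        else (st.1, 0)) (aux, c)
    = ((pvOv u (A.take j).reverse (aux.take j).reverse c).1.reverse ++ aux.drop j,
       (pvOv u (A.take j).reverse (aux.take j).reverse c).2) := by
  induction j generalizing aux c with
  | zero =>
    rw [show ((0 : Nat) : Int) - 1 = -1 by ring, PySem.List.pyRange_neg_one_eq_nil le_rfl]
    simp [pvOv]
  | succ j ih =>
    have hjl : j < A.length := by omega
    have hja : j < aux.length := by omega
    rw [show ((j + 1 : Nat) : Int) - 1 = (j : Nat) by push_cast; ring]
    rw [PySem.List.pyRange_neg_one_cons (by omega)]
    rw [List.foldl_cons]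
    have hgetA : PySem.List.pyGetD A (j : Int) 0 = A[j] := by
      rw [PySem.List.pyGetD_natCast, List.getD_eq_getElem A 0 hjl]
    have hgetaux : PySem.List.pyGetD aux (j : Int) 0 = aux[j] := by
      rw [PySem.List.pyGetD_natCast, List.getD_eq_getElem aux 0 hja]
    have htakeA : A.take (j + 1) = A.take j ++ [A[j]] := by
      rw [List.take_add_one, List.getElem?_eq_getElem hjl]; rfl
    have htakeaux : aux.take (j + 1) = aux.take j ++ [aux[j]] := by
      rw [List.take_add_one, List.getElem?_eq_getElem hja]; rfl
    have hdropaux : aux.drop j = aux[j] :: aux.drop (j + 1) := List.drop_eq_getElem_cons hja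
    by_cases hx : A[j] = 0
    · rw [if_pos (by rw [hgetA]; exact hx)]
      set v := u (c + 1) (PySem.List.pyGetD aux (j : Int) 0) with hv
      have hset : PySem.List.pySetD aux (j : Int) v = aux.set j v := PySem.List.pySetD_natCast aux j v
      rw [hset]
      rw [ih (aux.set j v) (c + 1) (by omega) (by simpa using ha)]
      have h1 : (aux.set j v).take j = aux.take j := by
        rw [List.take_set, List.set_eq_of_length_le (by simp [Nat.min_eq_left (le_of_lt hja)])]
      have h2 : (aux.set j v).drop j = v :: aux.drop (j + 1) := by
        rw [List.drop_set, if_neg (lt_irrefl j), Nat.sub_self, hdropaux, List.set_cons_zero]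
      have h3 : pvOv u (A.take (j + 1)).reverse (aux.take (j + 1)).reverse c
          = (v :: (pvOv u (A.take j).reverse (aux.take j).reverse (c + 1)).1,
             (pvOv u (A.take j).reverse (aux.take j).reverse (c + 1)).2) := by
        rw [htakeA, htakeaux]
        simp only [List.reverse_append, List.reverse_cons, List.reverse_nil, List.nil_append,
          List.singleton_append]
        simp [pvOv, hx, hv, hgetaux]
      rw [h1, h2, h3]
      simp
    · rw [if_neg (by rw [hgetA]; exact hx)]
      rw [ih aux 0 (by omega) ha]
      have h3 : pvOv u (A.take (j + 1)).reverse (aux.take (j + 1)).reverse c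
          = (aux[j] :: (pvOv u (A.take j).reverse (aux.take j).reverse 0).1,
             (pvOv u (A.take j).reverse (aux.take j).reverse 0).2) := by
        rw [htakeA, htakeaux]
        simp only [List.reverse_append, List.reverse_cons, List.reverse_nil, List.nil_append,
          List.singleton_append]
        simp [pvOv, hx]
      rw [h3, hdropaux]
      simp

theorem pvOv_overwrite (A : List Int) (c : Int) :
    pvOv (fun c' _ => c') A (List.replicate A.length 0) c = (pvScan A c, pvCarry A c) := by
  induction A generalizing c with
  | nil => simp [pvOv, pvScan, pvCarry]
  | cons x xs ih =>
    by_cases hx : x = 0 <;>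
      simp [pvOv, pvScan, pvCarry, List.replicate_succ, hx, ih]

theorem pvOv_min (xs os : List Int) (c : Int) (hl : os.length = xs.length)
    (h : ∀ p ∈ xs.zip os, p.1 ≠ 0 → p.2 = 0) :
    (pvOv min xs os c).1 = List.zipWith min (pvScan xs c) os := by
  induction xs generalizing os c with
  | nil =>
    rw [List.eq_nil_of_length_eq_zero hl]
    simp [pvOv, pvScan]
  | cons x xs ih =>
    cases os with
    | nil => simp at hl
    | cons o os =>
      have htail : ∀ p ∈ xs.zip os, p.1 ≠ 0 → p.2 = 0 := fun p hp => h p (by simp [hp])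
      by_cases hx : x = 0
      · simp [pvOv, pvScan, hx, ih os (c + 1) (by simpa using hl) htail]
      · have ho : o = 0 := h (x, o) (by simp) hx
        simp [pvOv, pvScan, hx, ho, ih os 0 (by simpa using hl) htail]

theorem pvScan_zero_align (A : List Int) (c : Int) :
    ∀ p ∈ A.zip (pvScan A c), p.1 ≠ 0 → p.2 = 0 := by
  induction A generalizing c with
  | nil => simp
  | cons x xs ih =>
    intro p hp hp1
    rcases List.mem_cons.mp (by simpa [pvScan] using hp) with rfl | hp'
    · simp only at hp1 ⊢
      simp [hp1]
    · exact ih _ p hp' hp1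


theorem pvZipReverse {α β : Type} (l1 : List α) (l2 : List β) (h : l1.length = l2.length) :
    l1.reverse.zip l2.reverse = (l1.zip l2).reverse := by
  induction l1 generalizing l2 with
  | nil => simp
  | cons x xs ih =>
    cases l2 with
    | nil => simp at h
    | cons y ys =>
      simp only [List.reverse_cons, List.zip_cons_cons]
      rw [List.zip_append (by simpa using h), ih ys (by simpa using h)]
      simp

theorem pvZipWithReverse {α β γ : Type} (f : α → β → γ) (l1 : List α) (l2 : List β)
    (h : l1.length = l2.length) :
    (List.zipWith f l1 l2).reverse = List.zipWith f l1.reverse l2.reverse := by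
  induction l1 generalizing l2 with
  | nil => simp
  | cons x xs ih =>
    cases l2 with
    | nil => simp at h
    | cons y ys =>
      simp only [List.reverse_cons, List.zipWith_cons_cons]
      rw [List.zipWith_append (by simpa using h), ih ys (by simpa using h)]
      simp

-- ===== VERDICT (by name: the statement is the Claim_ definition above) =====
theorem calculate_circular_array_sum_spec : Claim_equal_calculate_circular_array_sum := by
  intro N K A _hDom hPre
  unfold Spec_calculate_circular_array_sum
  by_cases hc : (PySem.List.count A 0 : Int) = N
  · unfold calculate_circular_array_sum calculate_circular_array_sum_alt
    rw [if_pos hc, if_pos hc]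
  · obtain ⟨hN0, hNle, hexW⟩ := hPre.resolve_left hc
    rw [show N = (N.toNat : Int) from (Int.toNat_of_nonneg hN0).symm] at hc hNle ⊢
    set n := N.toNat with hn
    set W := A.take n with hWdef
    have hnle : n ≤ A.length := by exact_mod_cast hNle
    have hWlen : W.length = n := by rw [hWdef, List.length_take]; omega
    have hex : ∃ y ∈ W, y ≠ 0 := hexW
    have hexR : ∃ y ∈ W.reverse, y ≠ 0 := by
      obtain ⟨y, hy, h0⟩ := hex
      exact ⟨y, by simpa using hy, h0⟩
    have htz : pvLz W.reverse < n := by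
      have := pvLz_lt_length W.reverse hexR
      rw [List.length_reverse, hWlen] at this
      exact this
    have hread : ∀ (i : Int), 0 ≤ i → i < (n : Int) →
        PySem.List.pyGetD A i 0 = PySem.List.pyGetD W i 0 := by
      intro i h0 hi
      have hiA : i < (A.length : Int) := by omega
      have hiW : i < (W.length : Int) := by rw [hWlen]; exact hi
      rw [PySem.List.pyGetD_eq_getElem A 0 h0 hiA, PySem.List.pyGetD_eq_getElem W 0 h0 hiW]
      simp only [hWdef, List.getElem_take]
    have hcW : pvCarry W 0 = (pvLz W.reverse : Int) := pvCarry_tz W 0 hex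
    have hcWR : pvCarry W.reverse 0 = (pvLz W : Int) := by
      have := pvCarry_tz W.reverse 0 hexR
      simpa using this
    have hPlen : (pvScan W (pvLz W.reverse : Int)).length = W.length := pvScan_length _ _
    -- predicate congruence on the two search ranges
    have hpd : ∀ i ∈ PySem.List.pyRange ((n : Int) - 1) (-1) (-1),
        (PySem.List.pyGetD A i 0 != 0) = (PySem.List.pyGetD W i 0 != 0) := by
      intro i hi
      rw [PySem.List.mem_pyRange_neg_one] at hi
      rw [hread i (by omega) (by omega)]
    have hpa : ∀ i ∈ PySem.List.pyRange 0 (n : Int) 1,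
        (PySem.List.pyGetD A i 0 != 0) = (PySem.List.pyGetD W i 0 != 0) := by
      intro i hi
      rw [PySem.List.mem_pyRange_one] at hi
      rw [hread i (by omega) (by omega)]
    -- find lemmas on the window
    have hfindD := pvFindDesc W n (le_of_eq hWlen.symm)
      (by rw [List.take_of_length_le (le_of_eq hWlen)]; exact hex)
    rw [List.take_of_length_le (le_of_eq hWlen)] at hfindD
    have hfindA := pvFindAsc W n 0 (by omega) (by simpa using hex)
    simp only [List.drop_zero, Nat.zero_add, Nat.cast_zero] at hfindA
    rw [hWlen] at hfindA
    have hseed1 : (n : Int) - ((n - 1 - pvLz W.reverse : Nat) : Int) - 1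
        = (pvLz W.reverse : Int) := by omega
    -- the two aux-array loops, evaluated on the window
    have hloop1 :
        (PySem.List.pyRange 0 (W.length : Int) 1).foldl
          (fun (st : List Int × Int) i =>
            if PySem.List.pyGetD W i 0 = 0 then
              (PySem.List.pySetD st.1 i (st.2 + 1), st.2 + 1)
            else (st.1, 0)) (List.replicate n 0, (pvLz W.reverse : Int))
        = ((List.replicate n 0).take 0 ++
            (pvOv (fun c' _ => c') (W.drop 0) ((List.replicate n 0).drop 0)
              (pvLz W.reverse : Int)).1,
           (pvOv (fun c' _ => c') (W.drop 0) ((List.replicate n 0).drop 0)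
              (pvLz W.reverse : Int)).2) :=
      pvLoopAsc W (fun c' _ => c') n 0 (List.replicate n 0) _ (by omega) (by simp [hWlen])
    rw [List.take_zero, List.drop_zero, List.drop_zero, List.nil_append,
      show List.replicate n (0 : Int) = List.replicate W.length 0 by rw [hWlen],
      pvOv_overwrite, hWlen] at hloop1
    have hloop2 := pvLoopDesc W min n (pvScan W (pvLz W.reverse : Int))
      ((pvLz W : Nat) : Int) (le_of_eq hWlen.symm) hPlen
    rw [List.take_of_length_le (le_of_eq hWlen),
      List.take_of_length_le (le_of_eq (by rw [hPlen, hWlen])),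
      List.drop_eq_nil_of_le (le_of_eq (by rw [hPlen, hWlen])), List.append_nil] at hloop2
    have hovmin : (pvOv min W.reverse ((pvScan W (pvLz W.reverse : Int)).reverse)
          (pvLz W : Int)).1
        = List.zipWith min (pvScan W.reverse (pvLz W : Int))
            ((pvScan W (pvLz W.reverse : Int)).reverse) := by
      refine pvOv_min W.reverse ((pvScan W (pvLz W.reverse : Int)).reverse) (pvLz W : Int)
        (by simp [hPlen]) ?_
      intro p hp hp1
      have hp' : p ∈ (W.zip (pvScan W (pvLz W.reverse : Int))).reverse := by
        rw [← pvZipReverse W _ hPlen.symm]; exact hp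
      exact pvScan_zero_align W _ p (List.mem_reverse.mp hp') hp1
    have hW : (List.zipWith min (pvScan W.reverse (pvLz W : Int))
          ((pvScan W (pvLz W.reverse : Int)).reverse)).reverse
        = List.zipWith min ((pvScan W.reverse (pvLz W : Int)).reverse)
            (pvScan W (pvLz W.reverse : Int)) := by
      rw [pvZipWithReverse min _ _ (by simp [pvScan_length]), List.reverse_reverse]
    have hWzlen : (List.zipWith min ((pvScan W.reverse (pvLz W : Int)).reverse)
        (pvScan W (pvLz W.reverse : Int))).length = n := by
      simp [pvScan_length, hWlen]
    have hfin :
        (PySem.List.pyRange 0 (n : Int) 1).foldl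
          (fun ans i => ans + 2 * max 0 (K - PySem.List.pyGetD
            (List.zipWith min ((pvScan W.reverse (pvLz W : Int)).reverse)
              (pvScan W (pvLz W.reverse : Int))) i 0)) A.sum
        = (List.zipWith min ((pvScan W.reverse (pvLz W : Int)).reverse)
            (pvScan W (pvLz W.reverse : Int))).foldl
            (fun ans a => ans + 2 * max 0 (K - a)) A.sum := by
      rw [show ((n : Int)) = (((List.zipWith min ((pvScan W.reverse (pvLz W : Int)).reverse)
          (pvScan W (pvLz W.reverse : Int))).length : Nat) : Int) by rw [hWzlen]]
      exact PySem.List.foldl_pyRange_zero_pyGetD' _ 0 (fun ans a => ans + 2 * max 0 (K - a)) A.sum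
    -- evaluate port A
    have hA : calculate_circular_array_sum (n : Int) K A
        = A.sum + (List.zipWith (fun a b => 2 * max 0 (K - min a b))
            (pvScan W (pvLz W.reverse : Int))
            ((pvScan W.reverse (pvLz W : Int)).reverse)).sum := by
      unfold calculate_circular_array_sum
      rw [if_neg hc]
      rw [pvFindCongr _ _ _ hpd, hfindD]
      simp only [Option.getD_some, Int.toNat_natCast]
      rw [hseed1]
      rw [show (PySem.List.pyRange 0 (n : Int) 1).foldl
            (fun (st : List Int × Int) i =>
              if PySem.List.pyGetD A i 0 = 0 then
                (PySem.List.pySetD st.1 i (st.2 + 1), st.2 + 1)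
              else (st.1, 0)) (List.replicate n 0, (pvLz W.reverse : Int))
          = (PySem.List.pyRange 0 (n : Int) 1).foldl
            (fun (st : List Int × Int) i =>
              if PySem.List.pyGetD W i 0 = 0 then
                (PySem.List.pySetD st.1 i (st.2 + 1), st.2 + 1)
              else (st.1, 0)) (List.replicate n 0, (pvLz W.reverse : Int)) from
        PySem.List.foldl_congr_mem _ _ _ _ (by
          intro acc x hx
          rw [PySem.List.mem_pyRange_one] at hx
          rw [hread x (by omega) (by omega)])]
      rw [hloop1]
      try simp only []
      rw [pvFindCongr _ _ _ hpa, hfindA]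
      simp only [Option.getD_some]
      rw [show (PySem.List.pyRange ((n : Int) - 1) (-1) (-1)).foldl
            (fun (st : List Int × Int) i =>
              if PySem.List.pyGetD A i 0 = 0 then
                (PySem.List.pySetD st.1 i (min (st.2 + 1) (PySem.List.pyGetD st.1 i 0)), st.2 + 1)
              else (st.1, 0)) (pvScan W (pvLz W.reverse : Int), (pvLz W : Int))
          = (PySem.List.pyRange ((n : Int) - 1) (-1) (-1)).foldl
            (fun (st : List Int × Int) i =>
              if PySem.List.pyGetD W i 0 = 0 then
                (PySem.List.pySetD st.1 i (min (st.2 + 1) (PySem.List.pyGetD st.1 i 0)), st.2 + 1)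
              else (st.1, 0)) (pvScan W (pvLz W.reverse : Int), (pvLz W : Int)) from
        PySem.List.foldl_congr_mem _ _ _ _ (by
          intro acc x hx
          rw [PySem.List.mem_pyRange_neg_one] at hx
          rw [hread x (by omega) (by omega)])]
      rw [hloop2]
      try simp only []
      rw [hovmin, hW, hfin]
      rw [PySem.List.foldl_add (g := fun a => 2 * max 0 (K - a))]
      rw [List.map_zipWith]
      rw [List.zipWith_comm_of_comm (fun x y => by rw [min_comm])]
    -- evaluate port B
    have hB : calculate_circular_array_sum_alt (n : Int) K A
        = A.sum + (List.zipWith (fun a b => 2 * max 0 (K - min a b))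
            (pvScan W (pvLz W.reverse : Int))
            ((pvScan W.reverse (pvLz W : Int)).reverse)).sum := by
      unfold calculate_circular_array_sum_alt
      rw [if_neg hc]
      rw [PySem.List.slice_to_natCast, ← hWdef]
      simp only [ne_eq, ite_not]
      rw [pvBuild_foldl, pvBuild_foldl]
      simp only [List.nil_append]
      rw [List.reverse_append, pvScan_append, pvScan_append, hcW, hcWR]
      try simp only []
      rw [PySem.List.slice_from_natCast, PySem.List.slice_to_natCast]
      rw [List.reverse_append]
      rw [List.drop_left' (by rw [pvScan_length, hWlen]),
        List.take_left' (by rw [List.length_reverse, pvScan_length, List.length_reverse, hWlen])]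
      rw [List.zip_eq_zipWith, List.map_zipWith]
    rw [hA, hB]
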